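-- pv_equiv track=rewrite | github.com/TallChris91/PASS | Ruleset_module.py | finalgoal
-- ===== SOURCE A (Python) =====
-- def finalgoal(gamecourselist, idx):
--     #There should be more than one goal scored in the match for this condition to fire
--     goalnumber = 0
--     for event in gamecourselist:
--         if (event['event'] == 'regular goal') or (event['event'] == 'penalty goal') or (event['event'] == 'own goal'):
--             if 'player' in event:
--                 goalnumber += 1
--             else:
--                 goalnumber += 2
--     if goalnumber > 1:
--         # If the goal is the last entry in the gamecourselist, it is the final goal
--         if idx == len(gamecourselist) - 1:
--             return True
--         # Else, check if there were goals scored after the event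
--         else:
--             # First make a list after the event
--             afterevents = gamecourselist[idx + 1:]
--             # Then search the list for goals
--             for event in afterevents:
--                 if (event['event'] == 'regular goal') or (event['event'] == 'penalty goal') or (event['event'] == 'own goal'):
--                     return False
--             return True
-- ===== SOURCE B (Python) =====
-- def finalgoal(gamecourselist, idx):
--     goals = ('regular goal', 'penalty goal', 'own goal')
--     goalnumber = 0
--     last_goal = -1
--     for i, event in enumerate(gamecourselist):
--         if event['event'] in goals:
--             goalnumber += 1 if 'player' in event else 2
--             last_goal = i
--     if goalnumber > 1:
--         return idx >= last_goal
-- ===== Notes on version B (the rewrite author's own statement) =====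
-- stated objective: alternative
-- what changed: B replaces A's tail-slice-and-rescan by one enumerated pass that computes the weighted goal count together with the index of the last goal, then answers with a single comparison idx >= last_goal; Pre_ excludes inputs where some event lacks the 'event' key, on which A raises KeyError.
-- intended difference: For idx < -1 when the weighted goal count exceeds 1 and no goal lies in A's wrapped tail slice, A's negative slice wraps around the list end and returns True, whereas B returns False because a negative position can never be at or after the last goal; reading idx as the event's position, B's answer is the intended one. — e.g. on finalgoal([[("event", "own goal")], [("event", "sub")]], -2): A returns some true, B returns some false
import Mathlib
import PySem

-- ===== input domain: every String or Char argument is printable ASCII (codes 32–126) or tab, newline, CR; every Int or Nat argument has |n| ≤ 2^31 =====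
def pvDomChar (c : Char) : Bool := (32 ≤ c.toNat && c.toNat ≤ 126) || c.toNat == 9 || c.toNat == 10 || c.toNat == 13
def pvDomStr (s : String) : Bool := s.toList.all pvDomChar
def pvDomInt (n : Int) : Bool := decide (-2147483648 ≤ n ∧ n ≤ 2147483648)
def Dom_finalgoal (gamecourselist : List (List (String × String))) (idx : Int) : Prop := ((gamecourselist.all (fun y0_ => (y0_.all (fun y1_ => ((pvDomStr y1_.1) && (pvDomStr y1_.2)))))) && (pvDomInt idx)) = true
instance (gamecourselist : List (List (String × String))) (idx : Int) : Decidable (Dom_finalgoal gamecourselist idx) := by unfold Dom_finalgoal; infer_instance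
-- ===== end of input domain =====

-- B replaces A's tail-slice-and-rescan by one pass computing the weighted goal count and the
-- last goal's index, answered by a single comparison idx >= last_goal (alternative
-- decomposition, same asymptotic cost). Return-value equivalence only; neither mutates.

-- ===== PORT A =====
-- A's repeated goal test: event['event'] == 'regular goal' or ... == 'penalty goal' or ... == 'own goal'
def finalgoalIsGoalA (e : List (String × String)) : Bool :=
  ((List.lookup "event" e).getD "" == "regular goal")
    || ((List.lookup "event" e).getD "" == "penalty goal")
    || ((List.lookup "event" e).getD "" == "own goal")

-- the weighted goal count: for event in gamecourselist: ...
def finalgoalCountA : List (List (String × String)) → Int → Int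
  | [], acc => acc
  | e :: t, acc =>
    finalgoalCountA t
      (if finalgoalIsGoalA e then
        (if (List.lookup "player" e).isSome then acc + 1 else acc + 2)
      else acc)

-- the tail scan: for event in afterevents: ... return False / return True
def finalgoalScanA : List (List (String × String)) → Option Bool
  | [] => some true
  | e :: t =>
    if finalgoalIsGoalA e then some false
    else finalgoalScanA t

-- event['event'] is ported as (List.lookup "event" e).getD "": Pre_ guarantees the key is
-- present, so the "" default is never read on admitted inputs (Python raises KeyError there).
def finalgoal (gamecourselist : List (List (String × String))) (idx : Int) : Option Bool :=
  let goalnumber := finalgoalCountA gamecourselist 0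
  if goalnumber > 1 then
    if idx == (gamecourselist.length : Int) - 1 then some true
    else finalgoalScanA (PySem.List.slice gamecourselist (some (idx + 1)) none)
  else none

-- ===== PORT B =====
def finalgoalIsGoalB (e : List (String × String)) : Bool :=
  (["regular goal", "penalty goal", "own goal"] : List String).contains
    ((List.lookup "event" e).getD "")

-- for i, event in enumerate(gamecourselist): state = (goalnumber, last_goal)
def finalgoalLoopB : Int → List (List (String × String)) → Int × Int → Int × Int
  | _, [], st => st
  | i, e :: t, st =>
    finalgoalLoopB (i + 1) t
      (if finalgoalIsGoalB e then
        (st.1 + (if (List.lookup "player" e).isSome then 1 else 2), i)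
      else st)

def finalgoal_alt (gamecourselist : List (List (String × String))) (idx : Int) : Option Bool :=
  let st := finalgoalLoopB 0 gamecourselist (0, -1)
  if st.1 > 1 then some (decide (idx ≥ st.2)) else none

-- ===== PRECONDITION & SPEC =====
-- Pre_ excludes exactly the inputs where some event lacks the 'event' key, on which the
-- Python A (and B alike) raises KeyError.
def Pre_finalgoal (gamecourselist : List (List (String × String))) (idx : Int) : Prop :=
  gamecourselist.all (fun e => (List.lookup "event" e).isSome) = true
instance (gamecourselist : List (List (String × String))) (idx : Int) : Decidable (Pre_finalgoal gamecourselist idx) := by unfold Pre_finalgoal; infer_instance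
def pvWitness_finalgoal : (List (List (String × String))) × Int :=
  ([[("event", "regular goal")], [("event", "sub")], [("event", "penalty goal")]], 1)

-- For idx < -1, when the weighted goal count exceeds 1 and no goal lies in A's wrapped tail
-- slice, A's negative slice wraps around and returns True, whereas B returns False because a
-- negative position can never be at or after the last goal; B's answer is the intended one.
def D_finalgoal (gamecourselist : List (List (String × String))) (idx : Int) : Prop :=
  idx < -1 ∧
  (2 ≤ gamecourselist.countP finalgoalIsGoalA ∨
    0 < gamecourselist.countP (fun e => finalgoalIsGoalA e && (List.lookup "player" e).isNone)) ∧
  (gamecourselist.drop ((gamecourselist.length : Int) + idx + 1).toNat).any finalgoalIsGoalA = false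
instance (gamecourselist : List (List (String × String))) (idx : Int) : Decidable (D_finalgoal gamecourselist idx) := by unfold D_finalgoal; infer_instance

def Spec_finalgoal (gamecourselist : List (List (String × String))) (idx : Int) (out : Option Bool) : Prop := ¬ D_finalgoal gamecourselist idx → out = finalgoal_alt gamecourselist idx
instance (gamecourselist : List (List (String × String))) (idx : Int) (out : Option Bool) : Decidable (Spec_finalgoal gamecourselist idx out) := by unfold Spec_finalgoal; infer_instance

def pvDiffWitness_finalgoal : (List (List (String × String))) × Int :=
  ([[("event", "own goal")], [("event", "sub")]], -2)
def pvDiffWitnessOut_finalgoal : (Option Bool) × (Option Bool) := (some true, some false)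

-- ===== CLAIM (what is proved, stated in full; the proofs are below) =====
def Claim_unchanged_finalgoal : Prop := ∀ (gamecourselist : List (List (String × String))) (idx : Int), Dom_finalgoal gamecourselist idx → Pre_finalgoal gamecourselist idx → Spec_finalgoal gamecourselist idx (finalgoal gamecourselist idx)
def Claim_changed_finalgoal : Prop := Dom_finalgoal (pvDiffWitness_finalgoal.1) (pvDiffWitness_finalgoal.2) ∧ Pre_finalgoal (pvDiffWitness_finalgoal.1) (pvDiffWitness_finalgoal.2) ∧ D_finalgoal (pvDiffWitness_finalgoal.1) (pvDiffWitness_finalgoal.2) ∧ finalgoal (pvDiffWitness_finalgoal.1) (pvDiffWitness_finalgoal.2) = pvDiffWitnessOut_finalgoal.1 ∧ finalgoal_alt (pvDiffWitness_finalgoal.1) (pvDiffWitness_finalgoal.2) = pvDiffWitnessOut_finalgoal.2 ∧ pvDiffWitnessOut_finalgoal.1 ≠ pvDiffWitnessOut_finalgoal.2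
def Claim_exact_finalgoal : Prop := ∀ (gamecourselist : List (List (String × String))) (idx : Int), Dom_finalgoal gamecourselist idx → Pre_finalgoal gamecourselist idx → D_finalgoal gamecourselist idx → finalgoal gamecourselist idx ≠ finalgoal_alt gamecourselist idx

-- ===== LEMMAS AND PROOFS =====

-- A's goal condition, B's membership test and D_'s predicate all agree
lemma isGoalB_eq (e : List (String × String)) :
    finalgoalIsGoalB e =
      (((List.lookup "event" e).getD "" == "regular goal")
        || ((List.lookup "event" e).getD "" == "penalty goal")
        || ((List.lookup "event" e).getD "" == "own goal")) := by
  unfold finalgoalIsGoalB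
  generalize (List.lookup "event" e).getD "" = x
  simp only [List.contains, List.elem]
  cases x == "regular goal" <;> cases x == "penalty goal" <;> cases x == "own goal" <;> rfl

lemma pvGoal_eq (e : List (String × String)) : finalgoalIsGoalA e = finalgoalIsGoalB e := by
  rw [isGoalB_eq]; rfl

-- B's fold computes A's weighted count
lemma loopB_fst (g : List (List (String × String))) :
    ∀ (i : Int) (st : Int × Int), (finalgoalLoopB i g st).1 = finalgoalCountA g st.1 := by
  induction g with
  | nil => intro i st; rfl
  | cons e t ih =>
    intro i st
    simp only [finalgoalLoopB, finalgoalCountA, ← pvGoal_eq]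
    split_ifs <;> simp [ih]

-- A's weighted count is the goal count plus the count of player-less goals
lemma countA_eq (g : List (List (String × String))) :
    ∀ acc : Int, finalgoalCountA g acc =
      acc + (g.countP finalgoalIsGoalA : Int)
          + (g.countP (fun e => finalgoalIsGoalA e && (List.lookup "player" e).isNone) : Int) := by
  induction g with
  | nil => intro acc; simp [finalgoalCountA]
  | cons e t ih =>
    intro acc
    simp only [finalgoalCountA, List.countP_cons]
    by_cases hg : finalgoalIsGoalA e = true
    · cases hp : (List.lookup "player" e).isSome
      · have hn : (List.lookup "player" e).isNone = true := by
          cases h : List.lookup "player" e <;> simp [h] at hp ⊢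
        simp only [hg, hn, if_true, Bool.and_true, ih]
        push_cast; ring
      · have hn : (List.lookup "player" e).isNone = false := by
          cases h : List.lookup "player" e <;> simp [h] at hp ⊢
        simp only [hg, hn, if_true, Bool.and_false, ih]
        push_cast; ring
    · simp only [eq_false_of_ne_true hg, ih]
      simp

-- the count side-condition of D_ is exactly "weighted count > 1"
lemma countA_gt_one (g : List (List (String × String))) :
    finalgoalCountA g 0 > 1 ↔
      (2 ≤ g.countP finalgoalIsGoalA ∨
        0 < g.countP (fun e => finalgoalIsGoalA e && (List.lookup "player" e).isNone)) := by
  rw [countA_eq]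
  have hle : g.countP (fun e => finalgoalIsGoalA e && (List.lookup "player" e).isNone)
      ≤ g.countP finalgoalIsGoalA := by
    apply List.countP_mono_left
    intro a _ h
    exact (Bool.and_elim_left h)
  omega

-- A's tail scan is the negated any
lemma scanA_eq (L : List (List (String × String))) :
    finalgoalScanA L = some (! L.any finalgoalIsGoalB) := by
  induction L with
  | nil => rfl
  | cons e t ih =>
    simp only [finalgoalScanA, List.any_cons, ← pvGoal_eq]
    split_ifs with h <;> simp [h, ih]

-- the last-goal tracker characterised against a drop of the list
lemma loopB_snd (g : List (List (String × String))) :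
    ∀ (i : Int) (st : Int × Int) (s : Int), st.2 < i →
      ((finalgoalLoopB i g st).2 < s ↔
        (st.2 < s ∧ (g.drop (s - i).toNat).any finalgoalIsGoalB = false)) := by
  induction g with
  | nil => intro i st s _; simp [finalgoalLoopB]
  | cons e t ih =>
    intro i st s hlt
    simp only [finalgoalLoopB]
    by_cases hg : finalgoalIsGoalB e
    · simp only [hg, if_pos]
      rw [ih (i + 1) _ s (by simp)]
      by_cases hs : s ≤ i
      · have h0 : (s - i).toNat = 0 := by omega
        rw [h0]
        simp only [List.drop_zero, List.any_cons, hg, Bool.true_or]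
        constructor
        · rintro ⟨h1, _⟩; omega
        · rintro ⟨_, h2⟩; simp at h2
      · have h1 : (s - i).toNat = (s - (i + 1)).toNat + 1 := by omega
        rw [h1]
        simp only [List.drop_succ_cons]
        constructor
        · rintro ⟨_, h2⟩; exact ⟨by omega, h2⟩
        · rintro ⟨_, h2⟩; exact ⟨by omega, h2⟩
    · simp only [hg, if_neg, Bool.false_eq_true, not_false_iff]
      rw [ih (i + 1) st s (by omega)]
      by_cases hs : s ≤ i
      · have h0 : (s - i).toNat = 0 := by omega
        have h0' : (s - (i + 1)).toNat = 0 := by omega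
        simp [h0, h0', hg]
      · have h1 : (s - i).toNat = (s - (i + 1)).toNat + 1 := by omega
        rw [h1]; simp only [List.drop_succ_cons]

-- drops past the length agree
lemma drop_toNat_eq (g : List (List (String × String))) (a b : Int) (h0 : 0 ≤ a) (h0' : 0 ≤ b)
    (hab : a = b ∨ ((g.length : Int) ≤ a ∧ (g.length : Int) ≤ b)) :
    g.drop a.toNat = g.drop b.toNat := by
  rcases hab with h | ⟨h1, h2⟩
  · rw [h]
  · rw [List.drop_eq_nil_of_le (by omega), List.drop_eq_nil_of_le (by omega)]

-- B's returned Bool characterised: idx ≥ last_goal ⟺ idx ≥ -1 and no goal after position idx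
lemma altBool_iff (g : List (List (String × String))) (idx : Int) :
    idx ≥ (finalgoalLoopB 0 g (0, -1)).2 ↔
      (-1 : Int) < idx + 1 ∧ (g.drop (idx + 1).toNat).any finalgoalIsGoalB = false := by
  have h := loopB_snd g 0 (0, -1) (idx + 1) (by norm_num)
  simp only [Int.sub_zero] at h
  constructor
  · intro hge; exact (h.mp (by omega))
  · intro hc; have := h.mpr hc; omega

-- ===== VERDICT (by name: the statement is the Claim_ definition above) =====
theorem finalgoal_spec : Claim_unchanged_finalgoal := by
  intro g idx _ _ hnD
  unfold finalgoal finalgoal_alt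
  simp only []
  rw [show finalgoalCountA g 0 = (finalgoalLoopB 0 g (0, -1)).1 from (loopB_fst g 0 (0, -1)).symm]
  set st := finalgoalLoopB 0 g (0, -1) with hst
  by_cases hc : st.1 > 1
  · simp only [if_pos hc]
    have hcntA : finalgoalCountA g 0 > 1 := by
      have h := hc; rw [hst, loopB_fst g 0 (0, -1)] at h; exact h
    by_cases hidx : idx = (g.length : Int) - 1
    · -- A returns True; B: last_goal < length, so idx = length - 1 ≥ last_goal
      have hlast : st.2 < (g.length : Int) := by
        rw [hst]
        rw [loopB_snd g 0 (0, -1) (g.length : Int) (by norm_num)]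
        refine ⟨by omega, ?_⟩
        have hdn : ((g.length : Int) - 0).toNat = g.length := by omega
        rw [hdn, List.drop_length]
        rfl
      subst hidx
      simp
      omega
    · have hbe : (idx == (g.length : Int) - 1) = false := by simp [hidx]
      simp only [hbe, if_neg, Bool.false_eq_true, not_false_iff]
      rw [scanA_eq]
      have hch := altBool_iff g idx
      by_cases hneg : (-1 : Int) < idx + 1
      · -- idx ≥ -1 : A's slice is drop (idx+1), same tail as B reasons about
        have hdk : PySem.List.slice g (some (idx + 1)) none = g.drop (idx + 1).toNat := by
          rw [PySem.List.slice_some_none]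
          have hclamp : (PySem.List.clampIdx g.length (idx + 1) : Int) =
              min (idx + 1) (g.length : Int) := by
            simp only [PySem.List.clampIdx]; split_ifs <;> omega
          rw [show PySem.List.clampIdx g.length (idx + 1) =
              ((PySem.List.clampIdx g.length (idx + 1) : Int)).toNat from (Int.toNat_natCast _).symm]
          apply drop_toNat_eq <;> omega
        rw [hdk]
        by_cases hany : (g.drop (idx + 1).toNat).any finalgoalIsGoalB = false
        · have : idx ≥ st.2 := hch.mpr ⟨hneg, hany⟩
          simp [hany, this]
        · have hany' : (g.drop (idx + 1).toNat).any finalgoalIsGoalB = true := by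
            simpa using hany
          have : ¬ idx ≥ st.2 := by
            intro h; exact hany (hch.mp h).2
          simp [hany', this]
      · -- idx < -1 : outside D_ there must be a goal in A's wrapped slice, so both are False
        have hidxlt : idx < -1 := by omega
        have hBfalse : ¬ idx ≥ st.2 := by
          intro h; exact hneg (hch.mp h).1
        have hcond := (countA_gt_one g).mp hcntA
        have hgoalafter :
            (g.drop ((g.length : Int) + idx + 1).toNat).any finalgoalIsGoalA = true := by
          by_contra hno
          exact hnD ⟨hidxlt, hcond, by simpa using eq_false_of_ne_true hno⟩
        have hdk : PySem.List.slice g (some (idx + 1)) none =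
            g.drop ((g.length : Int) + idx + 1).toNat := by
          rw [PySem.List.slice_some_none]
          rw [show PySem.List.clampIdx g.length (idx + 1) =
              ((g.length : Int) + idx + 1).toNat from by
            simp only [PySem.List.clampIdx]; split_ifs <;> omega]
        rw [hdk]
        have : (g.drop ((g.length : Int) + idx + 1).toNat).any finalgoalIsGoalB = true := by
          rw [show (finalgoalIsGoalB : List (String × String) → Bool) = finalgoalIsGoalA from
            funext fun e => (pvGoal_eq e).symm]
          exact hgoalafter
        simp [this, hBfalse]
  · simp [if_neg hc]

theorem finalgoal_changed : Claim_changed_finalgoal := by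
  unfold Claim_changed_finalgoal; decide

theorem finalgoal_tight : Claim_exact_finalgoal := by
  intro g idx _ _ hD
  obtain ⟨hidxlt, hcond, hnog⟩ := hD
  have hcntA : finalgoalCountA g 0 > 1 := (countA_gt_one g).mpr hcond
  have hA : finalgoal g idx = some true := by
    unfold finalgoal
    simp only []
    have hidxne : (idx == (g.length : Int) - 1) = false := by
      simp; omega
    simp only [if_pos hcntA, hidxne, if_neg, Bool.false_eq_true, not_false_iff]
    rw [scanA_eq]
    have hdk : PySem.List.slice g (some (idx + 1)) none =
        g.drop ((g.length : Int) + idx + 1).toNat := by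
      rw [PySem.List.slice_some_none]
      rw [show PySem.List.clampIdx g.length (idx + 1) =
          ((g.length : Int) + idx + 1).toNat from by
        simp only [PySem.List.clampIdx]; split_ifs <;> omega]
    rw [hdk]
    have : (g.drop ((g.length : Int) + idx + 1).toNat).any finalgoalIsGoalB = false := by
      rw [show (finalgoalIsGoalB : List (String × String) → Bool) = finalgoalIsGoalA from
        funext fun e => (pvGoal_eq e).symm]
      exact hnog
    simp [this]
  have hB : finalgoal_alt g idx = some false := by
    unfold finalgoal_alt
    simp only []
    have hc : (finalgoalLoopB 0 g (0, -1)).1 > 1 := by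
      rw [loopB_fst g 0 (0, -1)]; exact hcntA
    have hBfalse : ¬ idx ≥ (finalgoalLoopB 0 g (0, -1)).2 := by
      intro h
      have := ((altBool_iff g idx).mp h).1
      omega
    simp [if_pos hc, hBfalse]
  rw [hA, hB]
  simp
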